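-- pv_equiv track=rewrite | github.com/KII1ua/Artifact_Intelligence | simulated_anneling.py | evaluate
-- ===== SOURCE A (Python) =====
-- def evaluate(schedule, preference="공강최대형"):
--     occupied = set()
--     daily_slots = {i: [] for i in range(7)}  # 월~일 포함
--
--     penalty = 0
--     for times in schedule.values():
--         for day, period in times:
--             if (day, period) in occupied:
--                 penalty += 10
--             else:
--                 occupied.add((day, period))
--                 if day in daily_slots:
--                     daily_slots[day].append(period)
--
--     if preference == "공강최대형":
--         for periods in daily_slots.values():
--             if len(periods) >= 2:
--                 periods.sort()
--                 for i in range(1, len(periods)):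
--                     if periods[i] - periods[i - 1] > 1:
--                         penalty -= 5
--     elif preference == "몰빵형":
--         for periods in daily_slots.values():
--             if len(periods) > 0 and (max(periods) - min(periods)) <= len(periods):
--                 penalty -= 5
--     elif preference == "아침회피형":
--         for periods in daily_slots.values():
--             for p in periods:
--                 if p <= 2:
--                     penalty += 3
--
--     return penalty
-- ===== SOURCE B (Python) =====
-- from collections import Counter
--
--
-- def evaluate(schedule, preference="공강최대형"):
--     pairs = [t for times in schedule.values() for t in times]
--     distinct = Counter(pairs).keys()
--     penalty = 10 * (len(pairs) - len(distinct))
--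
--     day_sets = [{p for d, p in distinct if d == day} for day in range(7)]
--
--     if preference == "공강최대형":
--         for ps in day_sets:
--             if ps:
--                 # breaks = number of ascending runs minus one
--                 penalty -= 5 * (sum(1 for p in ps if p - 1 not in ps) - 1)
--     elif preference == "몰빵형":
--         for ps in day_sets:
--             if ps and max(ps) - min(ps) <= len(ps):
--                 penalty -= 5
--     elif preference == "아침회피형":
--         penalty += 3 * sum(1 for ps in day_sets for p in ps if p <= 2)
--
--     return penalty
-- ===== Notes on version B (the rewrite author's own statement) =====
-- stated objective: alternative
-- what changed: B flattens the schedule once, derives the duplicate penalty and the per-day distinct period sets from a Counter's keys instead of A's interleaved seen-set/dict loop, and counts breaks for the gap-preference branch by set-membership run counting (periods with no predecessor in the set, minus one) instead of sorting and scanning adjacent differences.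
import Mathlib
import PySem

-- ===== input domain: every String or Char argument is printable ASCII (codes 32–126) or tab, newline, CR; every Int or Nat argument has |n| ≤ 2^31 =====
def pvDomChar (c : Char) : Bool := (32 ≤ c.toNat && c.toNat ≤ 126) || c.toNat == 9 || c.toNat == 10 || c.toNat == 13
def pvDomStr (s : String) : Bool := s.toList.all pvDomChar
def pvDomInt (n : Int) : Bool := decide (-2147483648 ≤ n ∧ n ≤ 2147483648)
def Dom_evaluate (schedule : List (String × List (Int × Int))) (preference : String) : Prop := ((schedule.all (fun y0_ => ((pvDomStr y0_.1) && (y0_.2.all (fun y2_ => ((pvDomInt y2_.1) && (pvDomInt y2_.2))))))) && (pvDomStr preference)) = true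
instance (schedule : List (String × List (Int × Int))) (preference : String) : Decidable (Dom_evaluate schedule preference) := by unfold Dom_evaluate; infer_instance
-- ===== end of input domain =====

-- ===== PORT A =====
-- B replaces A's interleaved dedup/grouping loop by a Counter over the flattened pair list and
-- per-day sets, and the sort-plus-adjacent-scan by set-membership run counting (objective: alternative).
def stepA (st : PySem.Set (Int × Int) × PySem.Dict Int (List Int) × Int) (dp : Int × Int) :
    PySem.Set (Int × Int) × PySem.Dict Int (List Int) × Int :=
  match st with
  | (occupied, dailySlots, penalty) =>
    if occupied.contains dp then (occupied, dailySlots, penalty + 10)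
    else
      let occupied' := occupied.add dp
      if dailySlots.contains dp.1 then
        (occupied', dailySlots.modify dp.1 [] (fun v => v ++ [dp.2]), penalty)
      else (occupied', dailySlots, penalty)

def evaluate (schedule : List (String × List (Int × Int))) (preference : String) : Int :=
  let init : PySem.Set (Int × Int) × PySem.Dict Int (List Int) × Int :=
    (PySem.Set.empty, PySem.Dict.ofList ((PySem.List.pyRange 0 7).map (fun i => (i, ([] : List Int)))), 0)
  let st := (PySem.Dict.ofList schedule).values.foldl (fun st times => times.foldl stepA st) init
  let daily := st.2.1
  let penalty := st.2.2
  if preference == "공강최대형" then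
    daily.values.foldl (fun pen periods =>
      if 2 ≤ (periods.length : Int) then
        let s := PySem.List.sorted periods (fun x => x)
        (PySem.List.pyRange 1 (s.length : Int)).foldl (fun pen i =>
          if PySem.List.pyGetD s i 0 - PySem.List.pyGetD s (i - 1) 0 > 1 then pen - 5 else pen) pen
      else pen) penalty
  else if preference == "몰빵형" then
    daily.values.foldl (fun pen periods =>
      if 0 < (periods.length : Int) ∧
          PySem.List.maxD periods (fun x => x) 0 - PySem.List.minD periods (fun x => x) 0
            ≤ (periods.length : Int) then
        pen - 5
      else pen) penalty
  else if preference == "아침회피형" then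
    daily.values.foldl (fun pen periods =>
      periods.foldl (fun pen p => if p ≤ 2 then pen + 3 else pen) pen) penalty
  else penalty

-- ===== PORT B =====
def evaluate_alt (schedule : List (String × List (Int × Int))) (preference : String) : Int :=
  let pairs := ((PySem.Dict.ofList schedule).values).flatten
  let distinct := (PySem.Dict.counter pairs).keys
  let penalty : Int := 10 * ((pairs.length : Int) - (distinct.length : Int))
  let daySets : List (PySem.Set Int) :=
    (PySem.List.pyRange 0 7).map (fun day =>
      PySem.Set.ofList ((distinct.filter (fun p => p.1 == day)).map (fun p => p.2)))
  if preference == "공강최대형" then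
    daySets.foldl (fun pen ps =>
      if ps ≠ [] then
        pen - 5 * (((ps.countP (fun p => !ps.contains (p - 1))) : Int) - 1)
      else pen) penalty
  else if preference == "몰빵형" then
    daySets.foldl (fun pen ps =>
      if ps ≠ [] ∧
          PySem.List.maxD ps (fun x => x) 0 - PySem.List.minD ps (fun x => x) 0
            ≤ (ps.length : Int) then
        pen - 5
      else pen) penalty
  else if preference == "아침회피형" then
    penalty + 3 * ((daySets.map (fun ps => ((ps.countP (fun p => decide (p ≤ 2))) : Int))).sum)
  else penalty

-- ===== PRECONDITION & SPEC =====
def Spec_evaluate (schedule : List (String × List (Int × Int))) (preference : String) (out : Int) : Prop := out = evaluate_alt schedule preference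
instance (schedule : List (String × List (Int × Int))) (preference : String) (out : Int) : Decidable (Spec_evaluate schedule preference out) := by unfold Spec_evaluate; infer_instance

-- ===== CLAIM (what is proved, stated in full; the proofs are below) =====
def Claim_equal_evaluate : Prop := ∀ (schedule : List (String × List (Int × Int))) (preference : String), Dom_evaluate schedule preference → Spec_evaluate schedule preference (evaluate schedule preference)

-- ===== LEMMAS AND PROOFS =====

-- the pairs of L that are new relative to the already-seen set occ, in first-occurrence order
def fresh (occ : PySem.Set (Int × Int)) : List (Int × Int) → List (Int × Int)
  | [] => []
  | p :: t => if PySem.Set.contains occ p then fresh occ t else p :: fresh (occ ++ [p]) t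

-- number of adjacent differences > 1 (meant for sorted lists)
def gaps : List Int → Int
  | a :: b :: t => (if b - a > 1 then 1 else 0) + gaps (b :: t)
  | _ => 0

lemma update_eq_append_fresh (L : List (Int × Int)) : ∀ occ : PySem.Set (Int × Int),
    PySem.Set.update occ L = occ ++ fresh occ L := by
  induction L with
  | nil => intro occ; simp [PySem.Set.update, fresh]
  | cons p t ih =>
    intro occ
    simp only [PySem.Set.update, List.foldl_cons, fresh]
    by_cases h : p ∈ occ
    · simpa [PySem.Set.add, h, PySem.Set.update] using ih occ
    · simpa [PySem.Set.add, h, PySem.Set.update] using ih (occ ++ [p])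

lemma ofList_eq_fresh (L : List (Int × Int)) : PySem.Set.ofList L = fresh [] L := by
  have h := update_eq_append_fresh L []
  simpa [PySem.Set.ofList_eq_foldl, PySem.Set.update] using h

lemma loopA (L : List (Int × Int)) : ∀ (occ : PySem.Set (Int × Int))
    (daily : PySem.Dict Int (List Int)) (pen : Int),
    (L.foldl stepA (occ, daily, pen)).2.1.keys = daily.keys
    ∧ (∀ k, (L.foldl stepA (occ, daily, pen)).2.1.contains k = daily.contains k)
    ∧ (∀ k, daily.contains k = true →
        (L.foldl stepA (occ, daily, pen)).2.1.getD k [] =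
          daily.getD k [] ++ ((fresh occ L).filter (fun p => p.1 == k)).map (fun p => p.2))
    ∧ (L.foldl stepA (occ, daily, pen)).2.2
        = pen + 10 * ((L.length : Int) - ((fresh occ L).length : Int)) := by
  induction L with
  | nil => intro occ daily pen; simp [fresh]
  | cons p t ih =>
    intro occ daily pen
    simp only [List.foldl_cons, fresh]
    by_cases hocc : occ.contains p = true
    · -- duplicate
      have hs : stepA (occ, daily, pen) p = (occ, daily, pen + 10) := by
        simp only [stepA, hocc, if_true]
      rw [hs]
      simp only [hocc, if_true]
      obtain ⟨h1, h2, h3, h4⟩ := ih occ daily (pen + 10)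
      refine ⟨h1, h2, h3, ?_⟩
      rw [h4]; simp only [List.length_cons]; push_cast; ring
    · have hocc' : ¬ p ∈ occ := by simpa using hocc
      have hadd : occ.add p = occ ++ [p] := by simp [PySem.Set.add, hocc']
      have hoccf : occ.contains p = false := by simpa using hocc
      by_cases hd : daily.contains p.1 = true
      · have hs : stepA (occ, daily, pen) p
            = (occ ++ [p], daily.modify p.1 [] (fun v => v ++ [p.2]), pen) := by
          simp only [stepA, hoccf, Bool.false_eq_true, if_false, hd, if_true, hadd]
        rw [hs]
        simp only [hoccf, Bool.false_eq_true, if_false]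
        obtain ⟨h1, h2, h3, h4⟩ := ih (occ ++ [p]) (daily.modify p.1 [] (fun v => v ++ [p.2])) pen
        refine ⟨?_, ?_, ?_, ?_⟩
        · rw [h1, PySem.Dict.keys_modify, PySem.Dict.keys_insert_of_contains _ _ hd]
        · intro k
          rw [h2 k, PySem.Dict.contains_modify]
          by_cases hk : k = p.1 <;> simp [hk, hd]
        · intro k hk
          have hk' : (daily.modify p.1 [] (fun v => v ++ [p.2])).contains k = true := by
            rw [PySem.Dict.contains_modify]; simp [hk]
          rw [h3 k hk', PySem.Dict.getD_modify]
          by_cases hkp : k = p.1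
          · subst hkp; simp [List.filter_cons]
          · have hne : (p.1 == k) = false := by simp [Ne.symm hkp]
            simp [hkp, List.filter_cons, hne]
        · rw [h4]; simp only [List.length_cons]; push_cast; ring
      · have hdf : daily.contains p.1 = false := by simpa using hd
        have hs : stepA (occ, daily, pen) p = (occ ++ [p], daily, pen) := by
          simp only [stepA, hoccf, Bool.false_eq_true, if_false, hdf, hadd]
        rw [hs]
        simp only [hoccf, Bool.false_eq_true, if_false]
        obtain ⟨h1, h2, h3, h4⟩ := ih (occ ++ [p]) daily pen
        refine ⟨h1, h2, ?_, ?_⟩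
        · intro k hk
          rw [h3 k hk]
          have hne : (p.1 == k) = false := by
            rcases eq_or_ne p.1 k with h | h
            · rw [h] at hdf; rw [hk] at hdf; cases hdf
            · simp [h]
          simp [List.filter_cons, hne]
        · rw [h4]; simp only [List.length_cons]; push_cast; ring

lemma values_of_keys7 (d : PySem.Dict Int (List Int)) (h : d.keys = [0, 1, 2, 3, 4, 5, 6]) :
    d.values = [d.getD 0 [], d.getD 1 [], d.getD 2 [], d.getD 3 [],
                d.getD 4 [], d.getD 5 [], d.getD 6 []] := by
  rcases d with ⟨items⟩
  simp only [PySem.Dict.keys] at h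
  rcases items with _ | ⟨⟨k0, v0⟩, items⟩ <;> simp_all
  rcases items with _ | ⟨⟨k1, v1⟩, items⟩ <;> simp_all
  rcases items with _ | ⟨⟨k2, v2⟩, items⟩ <;> simp_all
  rcases items with _ | ⟨⟨k3, v3⟩, items⟩ <;> simp_all
  rcases items with _ | ⟨⟨k4, v4⟩, items⟩ <;> simp_all
  rcases items with _ | ⟨⟨k5, v5⟩, items⟩ <;> simp_all
  rcases items with _ | ⟨⟨k6, v6⟩, items⟩ <;> simp_all
  simp [PySem.Dict.getD, PySem.Dict.get?_mk_cons]

lemma runsAux (t : List Int) : ∀ a : Int, (a :: t).Pairwise (· < ·) →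
    ((t.countP (fun p => !(a :: t).contains (p - 1))) : Int) = gaps (a :: t) := by
  induction t with
  | nil => intro a _; simp [gaps]
  | cons b u ih =>
    intro a hp
    have hab : a < b := (List.pairwise_cons.1 hp).1 b (by simp)
    have hbu : ∀ x ∈ u, b < x := fun x hx => (List.pairwise_cons.1 (List.pairwise_cons.1 hp).2).1 x hx
    have hau : ∀ x ∈ u, a < x := fun x hx => (List.pairwise_cons.1 hp).1 x (by simp [hx])
    have hb : (!(a :: b :: u).contains (b - 1)) = decide (b - a > 1) := by
      by_cases h : b - a > 1
      · have hnm : ¬ (b - 1) ∈ (a :: b :: u) := by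
          simp only [List.mem_cons, not_or]
          refine ⟨by omega, by omega, ?_⟩
          intro hx
          exact absurd (hbu _ hx) (by omega)
        simp [h, List.contains_eq_mem, hnm]
      · have hba : b - 1 = a := by omega
        simp [h, List.contains_eq_mem, hba]
    have htail : ∀ p ∈ u, (!(a :: b :: u).contains (p - 1)) = (!(b :: u).contains (p - 1)) := by
      intro p hp'
      have hpa : p - 1 ≠ a := by have h1 := hau p hp'; have h2 := hbu p hp'; omega
      simp [List.contains_eq_mem, hpa]
    have hcnt : List.countP (fun p => !(a :: b :: u).contains (p - 1)) u
        = List.countP (fun p => !(b :: u).contains (p - 1)) u :=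
        List.countP_congr (fun x hx => by rw [htail x hx])
    have h2 := ih b (List.pairwise_cons.1 hp).2
    rw [List.countP_cons, hcnt, hb]
    show ((_ : Nat) : Int) = gaps (a :: b :: u)
    simp only [gaps]
    by_cases hba : b - a > 1 <;> simp only [hba, decide_true, decide_false, if_true, if_false] <;>
      push_cast <;> omega
lemma runs (s : List Int) (hs : s.Pairwise (· < ·)) (hne : s ≠ []) :
    ((s.countP (fun p => !s.contains (p - 1))) : Int) = gaps s + 1 := by
  rcases s with _ | ⟨a, t⟩
  · exact absurd rfl hne
  have hat : ∀ x ∈ t, a < x := fun x hx => (List.pairwise_cons.1 hs).1 x hx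
  have hhead : (!(a :: t).contains (a - 1)) = true := by
    have hnm : ¬ (a - 1) ∈ (a :: t) := by
      simp only [List.mem_cons, not_or]
      refine ⟨by omega, ?_⟩
      intro hx
      exact absurd (hat _ hx) (by omega)
    simp [List.contains_eq_mem, hnm]
  rw [List.countP_cons, hhead]
  push_cast
  rw [runsAux t a hs]
  simp

lemma pyRange_shift : ∀ (n : Nat) (a b : Int), (b - a).toNat = n →
    PySem.List.pyRange (a + 1) (b + 1) = (PySem.List.pyRange a b).map (· + 1) := by
  intro n
  induction n with
  | zero =>
    intro a b h
    rw [PySem.List.pyRange_one_eq_nil (by omega), PySem.List.pyRange_one_eq_nil (by omega)]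
    simp
  | succ n ih =>
    intro a b h
    rw [PySem.List.pyRange_one_cons (show a + 1 < b + 1 by omega),
        PySem.List.pyRange_one_cons (show a < b by omega), List.map_cons]
    congr 1
    exact ih (a + 1) b (by omega)

lemma pyGetD_cons_shift (x : Int) (t : List Int) (i : Int) (h : 1 ≤ i) :
    PySem.List.pyGetD (x :: t) i 0 = PySem.List.pyGetD t (i - 1) 0 := by
  rw [PySem.List.pyGetD_of_nonneg _ _ (by omega), PySem.List.pyGetD_of_nonneg _ _ (by omega)]
  have h2 : i.toNat = (i - 1).toNat + 1 := by omega
  rw [h2]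
  rfl

lemma innerA (s : List Int) : ∀ pen : Int,
    (PySem.List.pyRange 1 (s.length : Int)).foldl (fun pen i =>
        if PySem.List.pyGetD s i 0 - PySem.List.pyGetD s (i - 1) 0 > 1 then pen - 5 else pen) pen
      = pen - 5 * gaps s := by
  induction s with
  | nil => intro pen; simp [PySem.List.pyRange_one_eq_nil, gaps]
  | cons a t ih =>
    intro pen
    rcases t with _ | ⟨b, u⟩
    · simp [PySem.List.pyRange_one_eq_nil, gaps]
    · have hlen : (((a :: b :: u).length : Nat) : Int) = (((b :: u).length : Nat) : Int) + 1 := by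
        simp
      rw [hlen]
      have hsh : PySem.List.pyRange 1 ((((b :: u).length : Nat) : Int) + 1)
          = 1 :: (PySem.List.pyRange 1 (((b :: u).length : Nat) : Int)).map (· + 1) := by
        have h1 := pyRange_shift ((b :: u).length) 0 (((b :: u).length : Nat) : Int) (by simp)
        norm_num at h1
        have h2 : (((b :: u).length : Nat) : Int) = ((u.length : Nat) : Int) + 1 := by simp
        rw [h2, h1, PySem.List.pyRange_one_cons (by omega : (0 : Int) < ((u.length : Nat) : Int) + 1),
          List.map_cons]
        norm_num
      rw [hsh, List.foldl_cons, List.foldl_map]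
      have hstep1 : (if PySem.List.pyGetD (a :: b :: u) 1 0 - PySem.List.pyGetD (a :: b :: u) (1 - 1) 0 > 1
          then pen - 5 else pen) = (if b - a > 1 then pen - 5 else pen) := by
        norm_num [PySem.List.pyGetD]
      rw [hstep1]
      have hcongr : ∀ (acc : Int), ∀ x ∈ PySem.List.pyRange 1 (((b :: u).length : Nat) : Int),
          (fun acc x => if PySem.List.pyGetD (a :: b :: u) (x + 1) 0
              - PySem.List.pyGetD (a :: b :: u) (x + 1 - 1) 0 > 1 then acc - 5 else acc) acc x
          = (fun pen i => if PySem.List.pyGetD (b :: u) i 0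
              - PySem.List.pyGetD (b :: u) (i - 1) 0 > 1 then pen - 5 else pen) acc x := by
        intro acc x hx
        have hx1 : 1 ≤ x := (PySem.List.mem_pyRange_one.1 hx).1
        simp only []
        rw [pyGetD_cons_shift a _ (x + 1) (by omega), pyGetD_cons_shift a _ (x + 1 - 1) (by omega)]
        norm_num
      rw [PySem.List.foldl_congr_mem _ _ _ _ hcongr, ih]
      show _ = pen - 5 * gaps (a :: b :: u)
      simp only [gaps]
      by_cases hba : b - a > 1 <;> simp only [hba, if_true, if_false] <;> ring

lemma filtered_nodup (D : List (Int × Int)) (hD : D.Nodup) (k : Int) :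
    ((D.filter (fun p => p.1 == k)).map (fun p => p.2)).Nodup := by
  refine (hD.filter _).map_on ?_
  intro a ha b hb hab
  have ha1 : a.1 = k := by simpa using (List.mem_filter.1 ha).2
  have hb1 : b.1 = k := by simpa using (List.mem_filter.1 hb).2
  exact Prod.ext (ha1.trans hb1.symm) hab

lemma branch1_day (ps : List Int) (h : ps.Nodup) (pen : Int) :
    (if 2 ≤ (ps.length : Int) then
        (PySem.List.pyRange 1 ((PySem.List.sorted ps (fun x => x)).length : Int)).foldl
          (fun pen i =>
            if PySem.List.pyGetD (PySem.List.sorted ps (fun x => x)) i 0 -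
                PySem.List.pyGetD (PySem.List.sorted ps (fun x => x)) (i - 1) 0 > 1
            then pen - 5 else pen) pen
      else pen)
    = (if ps ≠ [] then pen - 5 * (((ps.countP (fun p => !ps.contains (p - 1))) : Int) - 1) else pen) := by
  have hperm : (PySem.List.sorted ps (fun x => x)).Perm ps := PySem.List.sorted_perm ps (fun x => x) false
  set s := PySem.List.sorted ps (fun x => x) with hsdef
  have hcnt : ps.countP (fun p => !ps.contains (p - 1)) = s.countP (fun p => !s.contains (p - 1)) := by
    have hfun : (fun p : Int => !ps.contains (p - 1)) = (fun p : Int => !s.contains (p - 1)) := by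
      funext p
      simp only [List.contains_eq_mem, hperm.mem_iff]
    rw [hfun, hperm.countP_eq]
  rcases ps with _ | ⟨x, t⟩
  · simp
  rcases t with _ | ⟨y, u⟩
  · -- singleton
    rw [if_neg (by simp), if_pos (by simp)]
    have hc : List.countP (fun p => !(([x] : List Int).contains (p - 1))) [x] = 1 := by
      simp [List.countP_cons, List.contains_eq_mem, show x - 1 ≠ x by omega]
    rw [hc]
    norm_num
  · -- length ≥ 2
    have hlen2 : 2 ≤ ((x :: y :: u).length : Int) := by simp; omega
    rw [if_pos hlen2, if_pos (by simp)]
    have hlt : s.Pairwise (· < ·) := by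
      have hle : s.Pairwise (· ≤ ·) := by
        simpa using PySem.List.sorted_pairwise (x :: y :: u) (fun x => x)
      have hnd : s.Nodup := (hperm.nodup_iff).2 h
      exact (hle.and hnd).imp (fun hab => lt_of_le_of_ne hab.1 hab.2)
    have hne : s ≠ [] := by
      intro hnil
      have := hperm.length_eq
      rw [hnil] at this
      simp at this
    rw [innerA s pen, hcnt, runs s hlt hne]
    ring


lemma branch1_fold : ∀ (ls : List (List Int)) (pen : Int), (∀ ps ∈ ls, ps.Nodup) →
    ls.foldl (fun pen periods =>
      if 2 ≤ (periods.length : Int) then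
        (PySem.List.pyRange 1 ((PySem.List.sorted periods (fun x => x)).length : Int)).foldl
          (fun pen i =>
            if PySem.List.pyGetD (PySem.List.sorted periods (fun x => x)) i 0 -
                PySem.List.pyGetD (PySem.List.sorted periods (fun x => x)) (i - 1) 0 > 1
            then pen - 5 else pen) pen
      else pen) pen
    = ls.foldl (fun pen ps =>
        if ps ≠ [] then pen - 5 * (((ps.countP (fun p => !ps.contains (p - 1))) : Int) - 1)
        else pen) pen := by
  intro ls
  induction ls with
  | nil => intro pen _; rfl
  | cons ps t ih =>
    intro pen hnd
    simp only [List.foldl_cons]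
    rw [branch1_day ps (hnd ps (by simp)) pen]
    exact ih _ (fun q hq => hnd q (by simp [hq]))

lemma inner3 (ps : List Int) : ∀ pen : Int,
    ps.foldl (fun pen p => if p ≤ 2 then pen + 3 else pen) pen
      = pen + 3 * ((ps.countP (fun p => decide (p ≤ 2))) : Int) := by
  induction ps with
  | nil => intro pen; simp
  | cons p t ih =>
    intro pen
    simp only [List.foldl_cons, List.countP_cons]
    by_cases hp : p ≤ 2
    · rw [if_pos hp, ih]; simp [hp]; push_cast; ring
    · rw [if_neg hp, ih]; simp [hp]

lemma outer3 : ∀ (ls : List (List Int)) (pen : Int),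
    ls.foldl (fun pen periods =>
        periods.foldl (fun pen p => if p ≤ 2 then pen + 3 else pen) pen) pen
      = pen + 3 * ((ls.map (fun ps => ((ps.countP (fun p => decide (p ≤ 2))) : Int))).sum) := by
  intro ls
  induction ls with
  | nil => intro pen; simp
  | cons ps t ih =>
    intro pen
    simp only [List.foldl_cons, List.map_cons, List.sum_cons]
    rw [inner3 ps pen, ih]
    ring

lemma branch2_step (ps : List Int) (pen : Int) :
    (if 0 < (ps.length : Int) ∧
        PySem.List.maxD ps (fun x => x) 0 - PySem.List.minD ps (fun x => x) 0 ≤ (ps.length : Int) then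
      pen - 5 else pen)
    = (if ps ≠ [] ∧
        PySem.List.maxD ps (fun x => x) 0 - PySem.List.minD ps (fun x => x) 0 ≤ (ps.length : Int) then
      pen - 5 else pen) := by
  have hiff : (0 < (ps.length : Int)) ↔ ps ≠ [] := by cases ps <;> simp
  rw [if_congr (and_congr_left fun _ => hiff) rfl rfl]

-- ===== VERDICT (by name: the statement is the Claim_ definition above) =====
theorem evaluate_spec : Claim_equal_evaluate := by
  intro schedule preference _hDom
  unfold Spec_evaluate
  simp only [evaluate, evaluate_alt]
  rw [← List.foldl_flatten]
  set L := ((PySem.Dict.ofList schedule).values).flatten with hLdef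
  set D0 := PySem.Dict.ofList (List.map (fun i => (i, ([] : List Int))) (PySem.List.pyRange 0 7))
    with hD0def
  obtain ⟨hk, hc, hg, hp⟩ := loopA L PySem.Set.empty D0 0
  have hdist : (PySem.Dict.counter L).keys = PySem.Set.ofList L := by
    rw [PySem.Dict.counter_eq_foldl,
      PySem.Dict.keys_foldl_modify L 0 (fun _ _ => (· + 1)) PySem.Dict.empty]
    simp [PySem.Set.update, PySem.Set.ofList_eq_foldl]
  have hfr : fresh PySem.Set.empty L = PySem.Set.ofList L := (ofList_eq_fresh L).symm
  have hD0keys : D0.keys = [0, 1, 2, 3, 4, 5, 6] := by decide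
  rw [values_of_keys7 _ (hk.trans hD0keys)]
  have hg0 := hg 0 (by decide); have hg1 := hg 1 (by decide); have hg2 := hg 2 (by decide)
  have hg3 := hg 3 (by decide); have hg4 := hg 4 (by decide); have hg5 := hg 5 (by decide)
  have hg6 := hg 6 (by decide)
  rw [hfr] at hg0 hg1 hg2 hg3 hg4 hg5 hg6
  rw [show D0.getD 0 [] = [] from by decide, List.nil_append] at hg0
  rw [show D0.getD 1 [] = [] from by decide, List.nil_append] at hg1
  rw [show D0.getD 2 [] = [] from by decide, List.nil_append] at hg2
  rw [show D0.getD 3 [] = [] from by decide, List.nil_append] at hg3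
  rw [show D0.getD 4 [] = [] from by decide, List.nil_append] at hg4
  rw [show D0.getD 5 [] = [] from by decide, List.nil_append] at hg5
  rw [show D0.getD 6 [] = [] from by decide, List.nil_append] at hg6
  rw [hg0, hg1, hg2, hg3, hg4, hg5, hg6]
  rw [hp, hfr, zero_add, hdist]
  rw [show PySem.List.pyRange 0 7 = [0, 1, 2, 3, 4, 5, 6] from rfl]
  simp only [List.map_cons, List.map_nil]
  have hnodupD : (PySem.Set.ofList L).Nodup := PySem.Set.nodup_ofList L
  have hcol : ∀ k : Int,
      PySem.Set.ofList (List.map (fun p => p.2) (List.filter (fun p => p.1 == k) (PySem.Set.ofList L)))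
        = List.map (fun p => p.2) (List.filter (fun p => p.1 == k) (PySem.Set.ofList L)) :=
    fun k => PySem.Set.ofList_eq_self_of_nodup _ (filtered_nodup _ hnodupD k)
  simp only [hcol]
  by_cases hp1 : (preference == "공강최대형") = true
  · simp only [hp1, if_true]
    refine branch1_fold _ _ ?_
    intro ps hps
    simp only [List.mem_cons, List.not_mem_nil, or_false] at hps
    rcases hps with rfl | rfl | rfl | rfl | rfl | rfl | rfl <;>
      exact filtered_nodup _ hnodupD _
  · simp only [hp1, Bool.false_eq_true, if_false]
    by_cases hp2 : (preference == "몰빵형") = true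
    · simp only [hp2, if_true]
      exact PySem.List.foldl_congr_mem _ _ _ _ (fun acc x _ => branch2_step x acc)
    · simp only [hp2, Bool.false_eq_true, if_false]
      by_cases hp3 : (preference == "아침회피형") = true
      · simp only [hp3, if_true]
        exact outer3 _ _
      · simp only [hp3, Bool.false_eq_true, if_false]
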